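-- pv_equiv track=rewrite | github.com/PTMahlangu/Dice-game | dice_gambling_game.py | sum_rolls
-- ===== SOURCE A (Python) =====
-- def sum_rolls(roll):
--     """ This method takes a list and return sum of the list under conditions """
--     factor =1
--     dice_sum =0
--     for i in range(len(roll)):
--         dice_sum += factor*roll[i]
--         if roll[i] ==1:
--             factor =0
--         elif roll[i] ==6:
--             factor= 2
--         else:
--             factor =1
--     return dice_sum
-- ===== SOURCE B (Python) =====
-- def sum_rolls(roll):
--     """Arithmetic reformulation in staged passes: the plain sum of all rolls,
--     plus a bonus pass (each roll that follows a 6 counts once more) and minus a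
--     penalty pass (each roll that follows a 1 is cancelled). No weight state."""
--     pairs = list(zip(roll, roll[1:]))
--     base = sum(roll)
--     bonus = sum(cur for prev, cur in pairs if prev == 6)
--     penalty = sum(cur for prev, cur in pairs if prev == 1)
--     return base + bonus - penalty
-- ===== Notes on version B (the rewrite author's own statement) =====
-- stated objective: alternative
-- what changed: Replaced the stateful carry-factor loop by an arithmetic decomposition: total = plain sum of all rolls + a bonus pass adding each roll that follows a 6 - a penalty pass subtracting each roll that follows a 1.
import Mathlib
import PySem

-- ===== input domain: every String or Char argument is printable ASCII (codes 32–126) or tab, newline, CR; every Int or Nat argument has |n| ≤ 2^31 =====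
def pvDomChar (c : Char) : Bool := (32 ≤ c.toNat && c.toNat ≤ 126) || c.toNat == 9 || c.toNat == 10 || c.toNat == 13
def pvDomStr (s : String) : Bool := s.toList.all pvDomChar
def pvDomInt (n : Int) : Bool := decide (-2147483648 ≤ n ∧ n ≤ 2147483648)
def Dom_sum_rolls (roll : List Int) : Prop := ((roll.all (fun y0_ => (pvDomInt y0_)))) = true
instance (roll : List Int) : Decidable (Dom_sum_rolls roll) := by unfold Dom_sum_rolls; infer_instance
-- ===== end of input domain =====

-- B replaces A's stateful carry-factor loop by an arithmetic decomposition in staged passes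
-- (plain sum + bonus after 6s - penalty after 1s); same cost, different structure.

-- ===== PORT A =====
-- state is (factor, dice_sum), updated per element exactly as A's loop body
def sum_rolls (roll : List Int) : Int :=
  (roll.foldl
    (fun (st : Int × Int) x =>
      (if x = 1 then 0 else if x = 6 then 2 else 1, st.2 + st.1 * x))
    (1, 0)).2

-- ===== PORT B =====
def sum_rolls_alt (roll : List Int) : Int :=
  let pairs := List.zip roll (roll.drop 1)
  let base := roll.foldl (fun s x => s + x) 0
  let bonus := (pairs.filter (fun pc => pc.1 == 6)).foldl (fun s pc => s + pc.2) 0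
  let penalty := (pairs.filter (fun pc => pc.1 == 1)).foldl (fun s pc => s + pc.2) 0
  base + bonus - penalty

-- ===== PRECONDITION & SPEC =====
def Spec_sum_rolls (roll : List Int) (out : Int) : Prop := out = sum_rolls_alt roll
instance (roll : List Int) (out : Int) : Decidable (Spec_sum_rolls roll out) := by unfold Spec_sum_rolls; infer_instance

-- ===== CLAIM (what is proved, stated in full; the proofs are below) =====
def Claim_equal_sum_rolls : Prop := ∀ (roll : List Int), Dom_sum_rolls roll → Spec_sum_rolls roll (sum_rolls roll)

-- ===== LEMMAS AND PROOFS =====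
theorem pv_foldl_add_shift {α : Type} (f : α → Int) (l : List α) : ∀ (a : Int),
    l.foldl (fun s x => s + f x) a = a + l.foldl (fun s x => s + f x) 0 := by
  induction l with
  | nil => intro a; simp
  | cons h t ih =>
    intro a
    simp only [List.foldl]
    rw [ih (a + f h), ih (0 + f h)]
    ring

-- B's three sums, on a list with explicit head, expressed for the main induction
theorem sum_rolls_loop_eq (t : List Int) : ∀ (prev total : Int),
    (t.foldl
      (fun (st : Int × Int) x =>
        (if x = 1 then 0 else if x = 6 then 2 else 1, st.2 + st.1 * x))
      (if prev = 1 then 0 else if prev = 6 then 2 else 1, total)).2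
    = total + t.foldl (fun s x => s + x) 0
        + ((List.zip (prev :: t) t).filter (fun pc => pc.1 == 6)).foldl (fun s pc => s + pc.2) 0
        - ((List.zip (prev :: t) t).filter (fun pc => pc.1 == 1)).foldl (fun s pc => s + pc.2) 0 := by
  induction t with
  | nil => intro prev total; simp
  | cons c t' ih =>
    intro prev total
    simp only [List.foldl, List.zip_cons_cons, List.filter]
    rw [ih c (total + (if prev = 1 then 0 else if prev = 6 then 2 else 1) * c)]
    by_cases h1 : prev = 1
    · subst h1
      simp only [show ((1:Int) == 6) = false by decide, show ((1:Int) == 1) = true by decide,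
                 eq_self_iff_true, if_true]
      simp only [List.foldl]
      rw [pv_foldl_add_shift (fun x : Int => x) t' (0 + c),
          pv_foldl_add_shift (fun pc : Int × Int => pc.2) _ (0 + c)]
      ring
    · by_cases h6 : prev = 6
      · subst h6
        simp only [show ((6:Int) == 6) = true by decide, show ((6:Int) == 1) = false by decide,
                   show ¬((6:Int) = 1) by decide, if_false,
                   eq_self_iff_true, if_true]
        simp only [List.foldl]
        rw [pv_foldl_add_shift (fun x : Int => x) t' (0 + c),
            pv_foldl_add_shift (fun pc : Int × Int => pc.2) _ (0 + c)]
        ring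
      · simp only [show ((prev : Int) == 6) = false by simp [h6],
                   show ((prev : Int) == 1) = false by simp [h1], h1, h6, if_false]
        rw [pv_foldl_add_shift (fun x : Int => x) t' (0 + c)]
        ring

-- ===== VERDICT (by name: the statement is the Claim_ definition above) =====
theorem sum_rolls_spec : Claim_equal_sum_rolls := by
  intro roll _
  unfold Spec_sum_rolls sum_rolls sum_rolls_alt
  cases roll with
  | nil => simp
  | cons h t =>
    simp only [List.foldl, List.drop_one, List.tail_cons]
    rw [sum_rolls_loop_eq t h (0 + 1 * h),
        pv_foldl_add_shift (fun x : Int => x) t (0 + h)]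
    ring
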